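-- pv_equiv track=rewrite | github.com/darsan-0/gramsahay-ai | backend/services/recommendation_service.py | rank_schemes_simple
-- ===== SOURCE A (Python) =====
-- from typing import Any, Dict, List, Optional
--
-- def rank_schemes_simple(schemes: List[Dict[str, Any]], preferred_categories: List[str]) -> List[Dict[str, Any]]:
--     """
--     Minimal deterministic ranking example (no AI).
--
--     Puts schemes whose category is in preferred_categories first; keeps order
--     otherwise. Useful as a baseline before ML ranking.
--     """
--     if not preferred_categories:
--         return list(schemes)
--
--     preferred = {c.strip().lower() for c in preferred_categories if c}
--     scored: List[tuple] = []
--     for s in schemes: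
--         cat = str(s.get("category", "")).lower()
--         score = 1 if cat in preferred else 0
--         scored.append((score, s))
--
--     scored.sort(key=lambda x: x[0], reverse=True)
--     return [s for _, s in scored]
-- ===== SOURCE B (Python) =====
-- from typing import Any, Dict, List
--
-- def rank_schemes_simple(schemes: List[Dict[str, Any]], preferred_categories: List[str]) -> List[Dict[str, Any]]:
--     """Simpler single-pass partition: preferred-category schemes first, others after, both in original order."""
--     if not preferred_categories:
--         return list(schemes)
--     preferred = {c.strip().lower() for c in preferred_categories if c}
--     front: List[Dict[str, Any]] = []
--     back: List[Dict[str, Any]] = []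
--     for s in schemes:
--         if str(s.get("category", "")).lower() in preferred:
--             front.append(s)
--         else:
--             back.append(s)
--     return front + back
-- ===== Notes on version B (the rewrite author's own statement) =====
-- stated objective: simpler
-- what changed: Replaces A's build-scored-tuples + stable reverse sort on a 0/1 score with a single-pass partition into preferred/other lists concatenated.
import Mathlib
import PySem

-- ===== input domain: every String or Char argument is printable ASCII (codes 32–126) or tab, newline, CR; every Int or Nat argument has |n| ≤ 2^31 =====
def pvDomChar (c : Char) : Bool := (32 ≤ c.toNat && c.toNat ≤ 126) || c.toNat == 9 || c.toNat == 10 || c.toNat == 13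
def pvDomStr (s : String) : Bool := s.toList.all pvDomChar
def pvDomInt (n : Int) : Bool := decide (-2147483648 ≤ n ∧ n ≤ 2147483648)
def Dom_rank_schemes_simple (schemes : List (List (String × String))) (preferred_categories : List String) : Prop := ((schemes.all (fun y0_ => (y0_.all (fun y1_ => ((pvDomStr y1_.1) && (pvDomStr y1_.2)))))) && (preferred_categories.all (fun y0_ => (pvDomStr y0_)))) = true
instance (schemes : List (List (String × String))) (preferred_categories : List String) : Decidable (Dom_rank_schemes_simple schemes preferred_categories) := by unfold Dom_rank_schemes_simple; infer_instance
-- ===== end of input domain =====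

-- B replaces A's 0/1-score stable reverse sort by a single-pass partition into preferred/other lists (simpler).

-- shared line of both Pythons: {c.strip().lower() for c in preferred_categories if c}
def pvPreferred (preferred_categories : List String) : PySem.Set String :=
  PySem.Set.ofList
    ((preferred_categories.filter (fun c => c ≠ "")).map
      (fun c => PySem.Str.lower (PySem.Str.strip c)))

-- shared sub-expression of both Pythons: str(s.get("category", "")).lower()
def pvCat (s : List (String × String)) : String :=
  PySem.Str.lower (PySem.Dict.getD (PySem.Dict.mk s) "category" "")

-- ===== PORT A =====
def rank_schemes_simple (schemes : List (List (String × String))) (preferred_categories : List String) : List (List (String × String)) :=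
  if preferred_categories = [] then schemes
  else
    let preferred := pvPreferred preferred_categories
    let scored : List (Int × List (String × String)) :=
      schemes.foldl (fun acc s =>
        let cat := pvCat s
        let score : Int := if PySem.Set.contains preferred cat then 1 else 0
        acc ++ [(score, s)]) []
    (PySem.List.sorted scored (fun x => x.1) true).map (fun x => x.2)

-- ===== PORT B =====
def rank_schemes_simple_alt (schemes : List (List (String × String))) (preferred_categories : List String) : List (List (String × String)) :=
  if preferred_categories = [] then schemes
  else
    let preferred := pvPreferred preferred_categories
    let fb := schemes.foldl (fun acc s =>
        if PySem.Set.contains preferred (pvCat s) then (acc.1 ++ [s], acc.2)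
        else (acc.1, acc.2 ++ [s])) ([], [])
    fb.1 ++ fb.2

-- ===== PRECONDITION & SPEC =====
def Spec_rank_schemes_simple (schemes : List (List (String × String))) (preferred_categories : List String) (out : List (List (String × String))) : Prop := out = rank_schemes_simple_alt schemes preferred_categories
instance (schemes : List (List (String × String))) (preferred_categories : List String) (out : List (List (String × String))) : Decidable (Spec_rank_schemes_simple schemes preferred_categories out) := by unfold Spec_rank_schemes_simple; infer_instance

-- ===== CLAIM (what is proved, stated in full; the proofs are below) =====
def Claim_equal_rank_schemes_simple : Prop := ∀ (schemes : List (List (String × String))) (preferred_categories : List String), Dom_rank_schemes_simple schemes preferred_categories → Spec_rank_schemes_simple schemes preferred_categories (rank_schemes_simple schemes preferred_categories)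

-- ===== LEMMAS AND PROOFS =====

-- A's scored-list building loop is map
theorem pv_foldl_append_map {α β : Type} (f : α → β) (l : List α) (init : List β) :
    l.foldl (fun acc s => acc ++ [f s]) init = init ++ l.map f := by
  induction l generalizing init with
  | nil => simp
  | cons x xs ih => simp [List.foldl_cons, ih]

-- B's partition loop is a pair of filters
theorem pv_foldl_partition {α : Type} (p : α → Bool) (l : List α) (l1 l2 : List α) :
    l.foldl (fun acc s => if p s then (acc.1 ++ [s], acc.2) else (acc.1, acc.2 ++ [s])) (l1, l2)
      = (l1 ++ l.filter p, l2 ++ l.filter (fun s => !p s)) := by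
  induction l generalizing l1 l2 with
  | nil => simp
  | cons x xs ih =>
    by_cases h : p x = true <;> simp [List.foldl_cons, h, ih]

-- inserting a key-1 element into ones ++ zeros lands just before the zeros
theorem pv_insert_one {τ : Type} (x : Int × τ) (ones zeros : List (Int × τ))
    (h1 : ∀ y ∈ ones, y.1 = 1) (h0 : ∀ y ∈ zeros, y.1 = 0) (hx : x.1 = 1) :
    PySem.List.insertBy (fun a b => decide ((b : Int × τ).1 < a.1)) x (ones ++ zeros)
      = ones ++ x :: zeros := by
  revert h1
  induction ones with
  | nil =>
    intro _
    cases zeros with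
    | nil => simp [PySem.List.insertBy]
    | cons z zs =>
      have hz : z.1 = 0 := h0 z (by simp)
      simp [PySem.List.insertBy, hz, hx]
  | cons o os ih =>
    intro h1
    have ho : o.1 = 1 := h1 o (by simp)
    have hrec := ih (fun y hy => h1 y (by simp [hy]))
    simp [PySem.List.insertBy, ho, hx, hrec]

-- inserting a key-0 element into a 0/1-keyed list appends it at the end
theorem pv_insert_zero {τ : Type} (x : Int × τ) (l : List (Int × τ))
    (h : ∀ y ∈ l, y.1 = 1 ∨ y.1 = 0) (hx : x.1 = 0) :
    PySem.List.insertBy (fun a b => decide ((b : Int × τ).1 < a.1)) x l = l ++ [x] := by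
  apply PySem.List.insertBy_of_forall_not_before
  intro y hy
  rcases h y hy with h1 | h0
  · simp [h1, hx]
  · simp [h0, hx]

-- the stable reverse sort of a 0/1-keyed list is the partition
theorem pv_sort_partition {τ : Type} (l : List (Int × τ)) (ones zeros : List (Int × τ))
    (h1 : ∀ y ∈ ones, y.1 = 1) (h0 : ∀ y ∈ zeros, y.1 = 0)
    (hl : ∀ x ∈ l, x.1 = 1 ∨ x.1 = 0) :
    l.foldl (fun acc x => PySem.List.insertBy (fun a b => decide ((b : Int × τ).1 < a.1)) x acc)
        (ones ++ zeros)
      = (ones ++ l.filter (fun x => x.1 == 1)) ++ (zeros ++ l.filter (fun x => x.1 == 0)) := by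
  induction l generalizing ones zeros with
  | nil => simp
  | cons x xs ih =>
    rcases hl x (by simp) with hx | hx
    · rw [List.foldl_cons, pv_insert_one x ones zeros h1 h0 hx,
        show ones ++ x :: zeros = (ones ++ [x]) ++ zeros by simp,
        ih (ones ++ [x]) zeros
          (by intro y hy; rcases List.mem_append.mp hy with h | h
              · exact h1 y h
              · simp at h; simpa [h] using hx) h0
          (fun y hy => hl y (by simp [hy]))]
      simp [hx]
    · rw [List.foldl_cons,
        pv_insert_zero x (ones ++ zeros)
          (by intro y hy; rcases List.mem_append.mp hy with h | h
              · exact Or.inl (h1 y h)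
              · exact Or.inr (h0 y h)) hx,
        show (ones ++ zeros) ++ [x] = ones ++ (zeros ++ [x]) by simp,
        ih ones (zeros ++ [x]) h1
          (by intro y hy; rcases List.mem_append.mp hy with h | h
              · exact h0 y h
              · simp at h; simpa [h] using hx)
          (fun y hy => hl y (by simp [hy]))]
      simp [hx]

-- A's score-sort-extract pipeline equals B's partition, for any predicate p
theorem pv_main {τ : Type} (p : τ → Bool) (l : List τ) :
    (PySem.List.sorted
        (l.foldl (fun acc s => acc ++ [((if p s then (1:Int) else 0), s)]) [])
        (fun x => x.1) true).map (fun x => x.2)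
      = (l.foldl (fun acc s => if p s then (acc.1 ++ [s], acc.2) else (acc.1, acc.2 ++ [s]))
            ([], [])).1
        ++ (l.foldl (fun acc s => if p s then (acc.1 ++ [s], acc.2) else (acc.1, acc.2 ++ [s]))
            ([], [])).2 := by
  rw [pv_foldl_append_map, pv_foldl_partition, PySem.List.sorted_rev_eq_foldl_insertBy,
    List.nil_append]
  have hsort := pv_sort_partition (l.map (fun s => ((if p s then (1:Int) else 0), s))) [] []
      (by simp) (by simp)
      (by intro x hx; simp at hx; rcases hx with ⟨s, _, rfl⟩; by_cases h : p s <;> simp [h])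
  simp only [List.nil_append] at hsort
  rw [hsort, List.map_append, List.filter_map, List.filter_map, List.map_map, List.map_map]
  have e1 : ((fun x : Int × τ => x.1 == 1) ∘ (fun s => ((if p s then (1:Int) else 0), s))) = p := by
    funext s; by_cases h : p s <;> simp [h]
  have e0 : ((fun x : Int × τ => x.1 == 0) ∘ (fun s => ((if p s then (1:Int) else 0), s)))
      = (fun s => !p s) := by
    funext s; by_cases h : p s <;> simp [h]
  have esnd : ((fun x : Int × τ => x.2) ∘ (fun s => ((if p s then (1:Int) else 0), s))) = id := by
    funext s; rfl
  rw [e1, e0, esnd, List.map_id, List.map_id]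
  simp

-- ===== VERDICT (by name: the statement is the Claim_ definition above) =====
theorem rank_schemes_simple_spec : Claim_equal_rank_schemes_simple := by
  intro schemes prefs _
  unfold Spec_rank_schemes_simple rank_schemes_simple rank_schemes_simple_alt
  by_cases hp : prefs = []
  · simp [hp]
  · simp only [hp, if_false]
    exact pv_main (fun s => PySem.Set.contains (pvPreferred prefs) (pvCat s)) schemes
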